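-- pv_equiv track=rewrite | github.com/Chesium/UCB-CS61A-SICP-Python | w5/burger.py | stern_brocot
-- ===== SOURCE A (Python) =====
-- def stern_brocot(n):
--   seq=[(0,1),(1,1)]
--   for _ in range(n):
--     nseq=[]
--     for i in range(len(seq)-1):
--       nseq+=[seq[i],(seq[i][0]+seq[i+1][0],seq[i][1]+seq[i+1][1])]
--     nseq+=[seq[-1]]
--     seq=nseq
--   return seq
-- ===== SOURCE B (Python) =====
-- def stern_brocot(n):
--   def f(l, r, d):
--     if d <= 0:
--       return [l, r]
--     m = (l[0] + r[0], l[1] + r[1])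
--     return f(l, m, d - 1) + f(m, r, d - 1)[1:]
--   return f((0, 1), (1, 1), n)
-- ===== Notes on version B (the rewrite author's own statement) =====
-- stated objective: alternative
-- what changed: Replaces the iterative level-by-level rebuild (re-indexing the whole sequence each round) by a recursive divide-and-conquer descent of the Stern-Brocot tree that emits the final sequence directly.
import Mathlib
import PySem

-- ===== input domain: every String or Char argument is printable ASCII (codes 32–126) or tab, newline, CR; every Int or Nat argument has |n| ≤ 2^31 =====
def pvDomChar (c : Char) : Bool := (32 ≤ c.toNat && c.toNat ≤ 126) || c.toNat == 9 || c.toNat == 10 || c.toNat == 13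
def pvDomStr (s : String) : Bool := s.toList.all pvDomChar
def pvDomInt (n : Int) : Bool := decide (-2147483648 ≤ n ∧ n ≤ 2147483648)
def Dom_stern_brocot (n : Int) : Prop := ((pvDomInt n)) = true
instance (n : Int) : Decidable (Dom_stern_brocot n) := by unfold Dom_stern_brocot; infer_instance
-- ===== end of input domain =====

-- B replaces A's iterative level-by-level rebuild with a recursive divide-and-conquer
-- descent of the Stern-Brocot tree (alternative decomposition, same result).


-- ===== PORT A =====
-- one pass of A's outer loop: the inner index loop plus the final append of seq[-1]
def sbStep (seq : List (Int × Int)) : List (Int × Int) :=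
  let nseq :=
    (PySem.List.pyRange 0 ((seq.length : Int) - 1) 1).foldl
      (fun ns i =>
        ns ++ [PySem.List.pyGetD seq i (0, 0),
               ((PySem.List.pyGetD seq i (0, 0)).1 + (PySem.List.pyGetD seq (i + 1) (0, 0)).1,
                (PySem.List.pyGetD seq i (0, 0)).2 + (PySem.List.pyGetD seq (i + 1) (0, 0)).2)]) []
  nseq ++ [PySem.List.pyGetD seq (-1) (0, 0)]

def stern_brocot (n : Int) : List (Int × Int) :=
  (PySem.List.pyRange 0 n 1).foldl (fun seq _ => sbStep seq) [(0, 1), (1, 1)]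

-- ===== PORT B =====
-- f(l, r, d) of Source B; the slice [1:] is PySem.List.slice _ (some 1) none
def sbRec (l r : Int × Int) (d : Int) : List (Int × Int) :=
  if d ≤ 0 then [l, r]
  else
    let m : Int × Int := (l.1 + r.1, l.2 + r.2)
    sbRec l m (d - 1) ++ PySem.List.slice (sbRec m r (d - 1)) (some 1) none
termination_by d.toNat
decreasing_by all_goals omega

def stern_brocot_alt (n : Int) : List (Int × Int) :=
  sbRec (0, 1) (1, 1) n

-- ===== PRECONDITION & SPEC =====
def Spec_stern_brocot (n : Int) (out : List (Int × Int)) : Prop := out = stern_brocot_alt n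
instance (n : Int) (out : List (Int × Int)) : Decidable (Spec_stern_brocot n out) := by unfold Spec_stern_brocot; infer_instance

-- ===== CLAIM (what is proved, stated in full; the proofs are below) =====
def Claim_equal_stern_brocot : Prop := ∀ (n : Int), Dom_stern_brocot n → Spec_stern_brocot n (stern_brocot n)

-- ===== LEMMAS AND PROOFS =====

def med (a b : Int × Int) : Int × Int := (a.1 + b.1, a.2 + b.2)

-- structural form of one level expansion: insert the mediant between adjacent entries
def ins : List (Int × Int) → List (Int × Int)
  | a :: b :: t => a :: med a b :: ins (b :: t)
  | l => l

-- Nat-depth form of B's recursion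
def fN (l r : Int × Int) : Nat → List (Int × Int)
  | 0 => [l, r]
  | d + 1 => fN l (med l r) d ++ (fN (med l r) r d).tail

lemma sbRec_eq_fN : ∀ (k : Nat) (l r : Int × Int) (d : Int), d.toNat = k → sbRec l r d = fN l r k := by
  intro k
  induction k with
  | zero =>
    intro l r d h
    have hd : d ≤ 0 := by omega
    simp [sbRec, hd, fN]
  | succ k ih =>
    intro l r d h
    have hd : ¬ d ≤ 0 := by omega
    rw [sbRec]
    simp only [hd, if_false]
    rw [PySem.List.slice_from_one, ih _ _ _ (by omega), ih _ _ _ (by omega)]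
    rfl

lemma fN_shape : ∀ (d : Nat) (l r : Int × Int), ∃ u, fN l r d = l :: u ++ [r] := by
  intro d
  induction d with
  | zero => intro l r; exact ⟨[], rfl⟩
  | succ d ih =>
    intro l r
    obtain ⟨u, hu⟩ := ih l (med l r)
    obtain ⟨v, hv⟩ := ih (med l r) r
    refine ⟨u ++ [med l r] ++ v, ?_⟩
    simp [fN, hu, hv]

lemma ins_cons (a : Int × Int) (t : List (Int × Int)) : ∃ w, ins (a :: t) = a :: w := by
  cases t with
  | nil => exact ⟨[], rfl⟩
  | cons b t' => exact ⟨med a b :: ins (b :: t'), rfl⟩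

lemma ins_split : ∀ (u : List (Int × Int)) (m : Int × Int) (v : List (Int × Int)),
    ins (u ++ [m] ++ v) = ins (u ++ [m]) ++ (ins (m :: v)).tail := by
  intro u
  induction u with
  | nil =>
    intro m v
    obtain ⟨w, hw⟩ := ins_cons m v
    simp [ins, hw]
  | cons a u' ih =>
    intro m v
    cases u' with
    | nil =>
      obtain ⟨w, hw⟩ := ins_cons m v
      simp [ins, hw, med]
    | cons b u'' =>
      have := ih m v
      simp only [List.cons_append, ins] at *
      rw [this]

lemma ins_fN (d : Nat) (l r : Int × Int) : ins (fN l r d) = fN l r (d + 1) := by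
  induction d generalizing l r with
  | zero => simp [fN, ins]
  | succ d ih =>
    obtain ⟨u, hu⟩ := fN_shape d l (med l r)
    obtain ⟨v, hv⟩ := fN_shape d (med l r) r
    have harg : fN l r (d + 1) = (l :: u) ++ [med l r] ++ (v ++ [r]) := by
      show fN l (med l r) d ++ (fN (med l r) r d).tail = _
      rw [hu, hv]; simp
    rw [harg, ins_split]
    rw [show (l :: u) ++ [med l r] = fN l (med l r) d from hu.symm]
    rw [show med l r :: (v ++ [r]) = fN (med l r) r d from hv.symm]
    rw [ih, ih]
    rfl

lemma fN_ne_nil (d : Nat) (l r : Int × Int) : fN l r d ≠ [] := by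
  obtain ⟨u, hu⟩ := fN_shape d l r
  simp [hu]

-- index-free form of the inner loop's accumulated list
def G (seq : List (Int × Int)) : List (Int × Int) :=
  (List.range (seq.length - 1)).flatMap
    (fun k => [seq.getD k (0, 0), med (seq.getD k (0, 0)) (seq.getD (k + 1) (0, 0))])

lemma sbStep_eq_G (seq : List (Int × Int)) (h : seq ≠ []) :
    sbStep seq = G seq ++ [seq.getLast h] := by
  simp only [sbStep, PySem.List.foldl_append_eq_flatMap, List.nil_append]
  rw [PySem.List.pyGetD_neg_one (h := h)]
  congr 1
  rw [PySem.List.pyRange_one]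
  have hn : ((seq.length : Int) - 1 - 0).toNat = seq.length - 1 := by omega
  rw [hn, List.flatMap_map]
  unfold G
  congr 1
  funext k
  rw [show (0 : Int) + (k : Int) + 1 = ((k + 1 : Nat) : Int) by push_cast; ring,
      show (0 : Int) + (k : Int) = ((k : Nat) : Int) by ring]
  simp only [PySem.List.pyGetD_natCast]
  simp [med, List.getD]

lemma G_last_eq_ins : ∀ (seq : List (Int × Int)) (h : seq ≠ []),
    G seq ++ [seq.getLast h] = ins seq := by
  intro seq
  induction seq with
  | nil => intro h; exact absurd rfl h
  | cons a t ih =>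
    intro h
    cases t with
    | nil => simp [G, ins]
    | cons b t' =>
      have hG : G (a :: b :: t') = [a, med a b] ++ G (b :: t') := by
        unfold G
        simp only [List.length_cons]
        rw [show a :: b :: t' = a :: b :: t' from rfl]
        rw [Nat.succ_sub_one, List.range_succ_eq_map, List.flatMap_cons, List.flatMap_map]
        simp [List.getD]
      have hlast : (a :: b :: t').getLast h = (b :: t').getLast (by simp) :=
        List.getLast_cons (by simp)
      rw [hG, hlast]
      have := ih (by simp)
      show [a, med a b] ++ G (b :: t') ++ [(b :: t').getLast _] = ins (a :: b :: t')
      rw [List.append_assoc, this]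
      rfl

lemma sbStep_eq_ins (seq : List (Int × Int)) (h : seq ≠ []) : sbStep seq = ins seq := by
  rw [sbStep_eq_G seq h, G_last_eq_ins seq h]

lemma foldl_const_iterate (L : List Int) : ∀ s, L.foldl (fun s _ => sbStep s) s = sbStep^[L.length] s := by
  induction L with
  | nil => intro s; rfl
  | cons x t ih =>
    intro s
    simp only [List.foldl_cons, List.length_cons, Function.iterate_succ_apply]
    exact ih (sbStep s)

lemma iterate_eq_fN : ∀ (k : Nat), sbStep^[k] [(0, 1), (1, 1)] = fN (0, 1) (1, 1) k := by
  intro k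
  induction k with
  | zero => rfl
  | succ k ih =>
    rw [Function.iterate_succ_apply', ih, sbStep_eq_ins _ (fN_ne_nil k _ _), ins_fN]

-- ===== VERDICT (by name: the statement is the Claim_ definition above) =====
theorem stern_brocot_spec : Claim_equal_stern_brocot := by
  intro n _
  unfold Spec_stern_brocot stern_brocot stern_brocot_alt
  rw [foldl_const_iterate, PySem.List.length_pyRange_one]
  have : (n - 0).toNat = n.toNat := by omega
  rw [this, iterate_eq_fN, sbRec_eq_fN n.toNat _ _ n rfl]
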